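-- pv_equiv track=rewrite | github.com/JiteshTalreja/LearnAI | Algorithms/Similarity searching/Traditional/WShingling.py | word_shingling
-- ===== SOURCE A (Python) =====
-- from typing import Set, List, Tuple
--
-- def word_shingling(text: str, w: int) -> Set[str]:
--     """
--     Generates word-based shingles of size w from the input text.
--
--     Args:
--         text: The input text string.
--         w: The shingle size (number of words).
--
--     Returns:
--         A set of word shingles.
--     """
--     # Tokenize the text into words
--     words = text.lower().split()
--
--     # Handle edge cases
--     if w <= 0 or len(words) < w:
--         return set()
--
--     # Generate all word w-shingles
--     shingles = set()
--     for i in range(len(words) - w + 1):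
--         shingle = " ".join(words[i:i + w])
--         shingles.add(shingle)
--
--     return shingles
-- ===== SOURCE B (Python) =====
-- def word_shingling(text, w):
--     words = text.lower().split()
--     if w > len(words):
--         return set()
--     # zip w shifted views of the token list; zip stops at the shortest,
--     # and range(w) is empty for w <= 0, so zip() yields nothing then.
--     return {" ".join(t) for t in zip(*(words[i:] for i in range(w)))}
-- ===== Notes on version B (the rewrite author's own statement) =====
-- stated objective: idiomatic
-- what changed: Replaces the index-window loop and its explicit w<=0 / short-text guards by the classic zip-of-shifted-slices n-gram idiom: w shifted views of the token list consumed in lockstep by zip, joined in a set comprehension (only a cheap w>len(words) guard kept to avoid materialising huge empty range(w) views).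
import Mathlib
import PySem

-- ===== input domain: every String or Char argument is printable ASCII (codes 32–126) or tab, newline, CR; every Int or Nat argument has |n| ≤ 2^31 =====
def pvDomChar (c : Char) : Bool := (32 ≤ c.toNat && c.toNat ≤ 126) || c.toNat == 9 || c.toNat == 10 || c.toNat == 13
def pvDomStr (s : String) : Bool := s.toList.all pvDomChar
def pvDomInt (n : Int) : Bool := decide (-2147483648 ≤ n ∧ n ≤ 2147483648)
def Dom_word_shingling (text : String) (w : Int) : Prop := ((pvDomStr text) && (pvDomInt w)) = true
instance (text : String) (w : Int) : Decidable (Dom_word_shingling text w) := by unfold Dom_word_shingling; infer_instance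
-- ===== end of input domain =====

-- B replaces A's index-window loop by the zip-of-shifted-slices n-gram idiom (same cost, more idiomatic).

-- ===== PORT A =====
def word_shingling (text : String) (w : Int) : List String :=
  let words := PySem.Str.split₀ (PySem.Str.lower text)
  if w ≤ 0 ∨ (words.length : Int) < w then
    PySem.Set.empty
  else
    (PySem.List.pyRange 0 ((words.length : Int) - w + 1) 1).foldl
      (fun shingles i =>
        PySem.Set.add shingles
          (PySem.Str.join " " (PySem.List.slice words (some i) (some (i + w)))))
      PySem.Set.empty

-- ===== PORT B =====
-- heads-and-tails of a list of lists: none iff some list is empty (zip stops there)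
def pvHeads? {α : Type} : List (List α) → Option (List α × List (List α))
  | [] => some ([], [])
  | [] :: _ => none
  | (h :: t) :: rest => (pvHeads? rest).map (fun p => (h :: p.1, t :: p.2))

-- zip of the first list against the remaining lists (Python zip truncates at shortest)
def pvZipAux {α : Type} : List α → List (List α) → List (List α)
  | [], _ => []
  | x :: xs, rest =>
    match pvHeads? rest with
    | none => []
    | some (hs, ts) => (x :: hs) :: pvZipAux xs ts

-- Python zip(*lss): zip() of no iterables yields nothing
def pvZip {α : Type} : List (List α) → List (List α)
  | [] => []
  | first :: rest => pvZipAux first rest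

def word_shingling_alt (text : String) (w : Int) : List String :=
  let words := PySem.Str.split₀ (PySem.Str.lower text)
  if (words.length : Int) < w then
    PySem.Set.empty
  else
    let slices := (PySem.List.pyRange 0 w 1).map (fun i => PySem.List.slice words (some i) none)
    PySem.Set.ofList ((pvZip slices).map (fun t => PySem.Str.join " " t))

-- ===== PRECONDITION & SPEC =====
def Spec_word_shingling (text : String) (w : Int) (out : List String) : Prop := out = word_shingling_alt text w
instance (text : String) (w : Int) (out : List String) : Decidable (Spec_word_shingling text w out) := by unfold Spec_word_shingling; infer_instance

-- ===== CLAIM (what is proved, stated in full; the proofs are below) =====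
def Claim_equal_word_shingling : Prop := ∀ (text : String) (w : Int), Dom_word_shingling text w → Spec_word_shingling text w (word_shingling text w)

-- ===== LEMMAS AND PROOFS =====

theorem pvHeads?_drops {α : Type} (k : Nat) (t : List α) (h : k ≤ t.length) :
    pvHeads? ((List.range k).map (fun i => t.drop i)) =
      some (t.take k, (List.range k).map (fun i => t.drop (i + 1))) := by
  induction k generalizing t with
  | zero => simp [pvHeads?]
  | succ k ih =>
    cases t with
    | nil => simp at h
    | cons a t' =>
      simp only [List.range_succ_eq_map, List.map_cons, List.map_map]
      have e1 : ((fun i => (a :: t').drop i) ∘ Nat.succ) = (fun i => t'.drop i) := by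
        funext i; simp
      have e2 : ((fun i => (a :: t').drop (i + 1)) ∘ Nat.succ) = (fun i => t'.drop (i + 1)) := by
        funext i; simp
      rw [e1, e2]
      simp only [List.drop_zero]
      simp only [pvHeads?]
      rw [ih t' (by simpa using h)]
      simp

theorem pvHeads?_drops_none {α : Type} (k : Nat) (t : List α) (h : t.length < k) :
    pvHeads? ((List.range k).map (fun i => t.drop i)) = none := by
  induction k generalizing t with
  | zero => omega
  | succ k ih =>
    simp only [List.range_succ_eq_map, List.map_cons, List.map_map, List.drop_zero]
    cases t with
    | nil => simp [pvHeads?]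
    | cons a t' =>
      have e1 : ((fun i => (a :: t').drop i) ∘ Nat.succ) = (fun i => t'.drop i) := by
        funext i; simp
      rw [e1]
      simp only [pvHeads?]
      rw [ih t' (by simpa using h)]
      rfl

theorem pvZipAux_drops {α : Type} (k : Nat) (xs : List α) :
    pvZipAux xs ((List.range k).map (fun i => xs.drop (i + 1))) =
      (List.range (xs.length - k)).map (fun i => (xs.drop i).take (k + 1)) := by
  induction xs with
  | nil => simp [pvZipAux]
  | cons a t ih =>
    have e1 : (fun i => (a :: t).drop (i + 1)) = (fun i => t.drop i) := by
      funext i; simp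
    rw [e1]
    by_cases h : k ≤ t.length
    · simp only [pvZipAux, pvHeads?_drops k t h]
      have hlen : (a :: t).length - k = (t.length - k) + 1 := by
        simp only [List.length_cons]; omega
      rw [hlen, List.range_succ_eq_map, List.map_cons, List.map_map, List.drop_zero,
        List.take_succ_cons, ih]
      congr 1
    · simp only [pvZipAux, pvHeads?_drops_none k t (by omega)]
      have hlen : (a :: t).length - k = 0 := by simp only [List.length_cons]; omega
      rw [hlen]
      simp

theorem pvZip_drops {α : Type} (k : Nat) (xs : List α) :
    pvZip ((List.range (k + 1)).map (fun i => xs.drop i)) =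
      (List.range (xs.length - k)).map (fun i => (xs.drop i).take (k + 1)) := by
  rw [List.range_succ_eq_map, List.map_cons, List.map_map, List.drop_zero]
  have e1 : ((fun i => xs.drop i) ∘ Nat.succ) = (fun i => xs.drop (i + 1)) := by
    funext i; simp
  rw [e1]
  exact pvZipAux_drops k xs

theorem foldl_add_map {α β : Type} [BEq β] (g : α → β) (l : List α) (s : PySem.Set β) :
    l.foldl (fun s i => PySem.Set.add s (g i)) s = (l.map g).foldl PySem.Set.add s := by
  induction l generalizing s with
  | nil => rfl
  | cons a t ih => simp [List.foldl_cons, ih]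

-- ===== VERDICT (by name: the statement is the Claim_ definition above) =====

theorem word_shingling_spec : Claim_equal_word_shingling := by
  unfold Claim_equal_word_shingling
  intro text w _
  unfold Spec_word_shingling word_shingling word_shingling_alt
  simp only []
  set words := PySem.Str.split₀ (PySem.Str.lower text) with hw
  by_cases h0 : (words.length : Int) < w
  · -- A: len < w forces the guard (w > len ≥ 0 could still have w ≤ 0? no: w > len ≥ 0)
    rw [if_pos h0, if_pos (Or.inr h0)]
  · rw [if_neg h0]
    by_cases h1 : w ≤ 0
    · rw [if_pos (Or.inl h1)]
      rw [PySem.List.pyRange_one_eq_nil (by omega)]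
      simp [pvZip, PySem.Set.ofList, PySem.Set.empty]
    · -- 0 < w ≤ len
      rw [if_neg (by push Not; constructor <;> omega)]
      obtain ⟨k, hk⟩ : ∃ k : Nat, w = ((k + 1 : Nat) : Int) :=
        ⟨w.toNat - 1, by omega⟩
      subst hk
      -- B side: slices are the k+1 shifted views
      have hslices : (PySem.List.pyRange 0 ((k + 1 : Nat) : Int) 1).map
            (fun i => PySem.List.slice words (some i) none)
          = (List.range (k + 1)).map (fun i => words.drop i) := by
        rw [PySem.List.pyRange_one]
        rw [List.map_map]
        apply List.map_congr_left
        intro i hi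
        simp only [Function.comp]
        rw [show (0 : Int) + (i : Int) = ((i : Nat) : Int) by omega]
        exact PySem.List.slice_from_natCast words i
      rw [hslices, pvZip_drops k words]
      -- A side: foldl of adds = ofList of the mapped range
      rw [foldl_add_map]
      rw [PySem.Set.ofList_eq_foldl]
      have hempty : (PySem.Set.empty : PySem.Set String) = [] := rfl
      rw [hempty]
      refine congrArg (List.foldl PySem.Set.add []) ?_
      rw [PySem.List.pyRange_one, List.map_map, List.map_map]
      have hm : ((words.length : Int) - ((k + 1 : Nat) : Int) + 1 - 0).toNat
          = words.length - k := by omega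
      rw [hm]
      apply List.map_congr_left
      intro i hi
      simp only [Function.comp]
      rw [show (0 : Int) + (i : Int) = ((i : Nat) : Int) by omega]
      rw [PySem.List.slice_natCast_add]
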